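-- pv_equiv track=rewrite | github.com/gautham227/CP-Solutions | Atcoder/Python (3.8.2)/abc177_b/21480678.py | ga
-- ===== SOURCE A (Python) =====
-- def ga(b,a):
--     n=len(b)
--     m=len(a)
--     f=1001
--     for i in range(m-n+1):
--         t=0
--         for j in range(n):
--             if b[j]!=a[i+j]:
--                 t=t+1
--         f=min(t,f)
--     return f
-- ===== SOURCE B (Python) =====
-- def ga(b, a):
--     # Transposed sweep: one mismatch-count cell per alignment, updated
--     # pattern-position by pattern-position, then a final minimum scan.
--     n = len(b)
--     m = len(a)
--     k = m - n + 1
--     if k <= 0: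
--         return 1001
--     cnt = [0] * k
--     for j, ch in enumerate(b):
--         cnt = [c + (a[i + j] != ch) for i, c in enumerate(cnt)]
--     best = 1001
--     for c in cnt:
--         if c < best:
--             best = c
--     return best
-- ===== Notes on version B (the rewrite author's own statement) =====
-- stated objective: alternative
-- what changed: B transposes the loop nest: instead of computing each alignment's Hamming distance with an inner scan, it keeps one running mismatch counter per alignment and sweeps the pattern positions once, updating all counters, then takes the minimum in a final pass.
import Mathlib
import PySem

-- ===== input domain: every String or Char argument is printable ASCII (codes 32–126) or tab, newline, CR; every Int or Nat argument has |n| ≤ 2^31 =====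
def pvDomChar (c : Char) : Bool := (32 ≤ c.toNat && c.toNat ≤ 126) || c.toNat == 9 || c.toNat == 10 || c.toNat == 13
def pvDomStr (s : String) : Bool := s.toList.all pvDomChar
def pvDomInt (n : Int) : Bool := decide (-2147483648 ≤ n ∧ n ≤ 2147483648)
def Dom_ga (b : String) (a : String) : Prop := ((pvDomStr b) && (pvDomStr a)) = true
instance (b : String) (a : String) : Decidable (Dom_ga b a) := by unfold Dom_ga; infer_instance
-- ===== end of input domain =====

-- ===== PORT A =====
-- A: for each alignment i, an inner scan counts mismatches; f = min(t, f).
def ga (b : String) (a : String) : Int :=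
  let bl := b.toList
  let al := a.toList
  let n : Int := PySem.List.len bl
  let m : Int := PySem.List.len al
  (PySem.List.pyRange 0 (m - n + 1) 1).foldl
    (fun f i =>
      min ((PySem.List.pyRange 0 n 1).foldl
            (fun t j =>
              if PySem.List.pyGetD bl j ' ' ≠ PySem.List.pyGetD al (i + j) ' ' then t + 1 else t)
            0) f)
    1001

-- ===== PORT B =====
-- B (transposed sweep): one running mismatch counter per alignment, updated once per
-- pattern position, then a final minimum scan.
def ga_alt (b : String) (a : String) : Int :=
  let bl := b.toList
  let al := a.toList
  let n : Int := PySem.List.len bl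
  let m : Int := PySem.List.len al
  let k : Int := m - n + 1
  if k ≤ 0 then 1001
  else
    let cnt0 : List Int := PySem.List.pyRepeat [(0 : Int)] k
    let cnt :=
      (PySem.List.enumerate bl).foldl
        (fun cnt p =>
          (PySem.List.enumerate cnt).map
            (fun q => q.2 + (if PySem.List.pyGetD al (q.1 + p.1) ' ' ≠ p.2 then 1 else 0)))
        cnt0
    cnt.foldl (fun best c => if c < best then c else best) 1001

-- ===== PRECONDITION & SPEC =====
def Spec_ga (b : String) (a : String) (out : Int) : Prop := out = ga_alt b a
instance (b : String) (a : String) (out : Int) : Decidable (Spec_ga b a out) := by unfold Spec_ga; infer_instance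

-- ===== CLAIM (what is proved, stated in full; the proofs are below) =====
def Claim_equal_ga : Prop := ∀ (b : String) (a : String), Dom_ga b a → Spec_ga b a (ga b a)

-- ===== LEMMAS AND PROOFS =====

-- B's per-step list update, named for the proofs.
def gaStep (al : List Char) (cnt : List Int) (p : Int × Char) : List Int :=
  (PySem.List.enumerate cnt).map
    (fun q => q.2 + (if PySem.List.pyGetD al (q.1 + p.1) ' ' ≠ p.2 then 1 else 0))

-- 0/1 indicator of a mismatch of alignment i at pattern position/char p.
def gaInd (al : List Char) (i : Int) (p : Int × Char) : Int :=
  if PySem.List.pyGetD al (i + p.1) ' ' ≠ p.2 then 1 else 0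

-- One B-step on a counter list of the shape (range k).map g adds the indicator pointwise.
theorem gaStep_map (al : List Char) (k : Int) (g : Int → Int) (p : Int × Char) :
    gaStep al ((PySem.List.pyRange 0 k 1).map g) p
      = (PySem.List.pyRange 0 k 1).map (fun i => g i + gaInd al i p) := by
  unfold gaStep gaInd
  rw [PySem.List.enumerate_eq_map_pyRange (d := 0)]
  simp only [PySem.List.len_eq, List.length_map, PySem.List.length_pyRange_one, List.map_map]
  by_cases hk : k ≤ 0
  · have h1 : PySem.List.pyRange 0 k 1 = [] := PySem.List.pyRange_one_eq_nil hk
    have h2 : PySem.List.pyRange 0 (max k 0) 1 = [] := PySem.List.pyRange_one_eq_nil (by omega)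
    simp [h1, h2]
  · rw [show (((k - 0).toNat : Int)) = k from by omega]
    apply List.map_congr_left
    intro i hi
    rw [PySem.List.mem_pyRange_one] at hi
    simp only [Function.comp]
    rw [PySem.List.pyGetD_map_pyRange_of_nonneg _ _ _ _ hi.1 hi.2]

-- B's whole fold over the enumerated pattern: counters become per-alignment indicator sums.
theorem gaFold_map (al : List Char) (k : Int) (jl : List (Int × Char)) (g : Int → Int) :
    jl.foldl (gaStep al) ((PySem.List.pyRange 0 k 1).map g)
      = (PySem.List.pyRange 0 k 1).map
          (fun i => g i + (jl.map (gaInd al i)).sum) := by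
  induction jl generalizing g with
  | nil => simp
  | cons p jl ih =>
      simp only [List.foldl_cons, List.map_cons, List.sum_cons]
      rw [gaStep_map, ih]
      apply List.map_congr_left
      intro i _
      ring

-- A's inner mismatch scan equals the per-alignment indicator sum B accumulates.
theorem inner_eq (bl al : List Char) (i : Int) :
    (PySem.List.pyRange 0 ((bl.length : Int)) 1).foldl
        (fun t j =>
          if PySem.List.pyGetD bl j ' ' ≠ PySem.List.pyGetD al (i + j) ' ' then t + 1 else t)
        0
      = ((PySem.List.enumerate bl).map (gaInd al i)).sum := by
  rw [PySem.List.foldl_ite_add_one]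
  rw [PySem.List.enumerate_eq_map_pyRange (d := ' '), List.map_map]
  simp only [PySem.List.len_eq]
  unfold gaInd
  have hfun : ((fun p : Int × Char => if PySem.List.pyGetD al (i + p.1) ' ' ≠ p.2 then (1 : Int) else 0)
        ∘ fun j => (j, PySem.List.pyGetD bl j ' '))
      = fun j => if (fun j => decide (PySem.List.pyGetD bl j ' ' ≠ PySem.List.pyGetD al (i + j) ' ')) j = true
          then (1 : Int) else 0 := by
    funext j
    simp [Function.comp, ne_comm]
  rw [hfun, PySem.List.sum_map_ite_one_zero]
  simp

-- the final min-scan with strict `<` is a foldl of `min`.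
theorem foldl_lt_eq_foldl_min (l : List Int) (a : Int) :
    l.foldl (fun best c => if c < best then c else best) a
      = l.foldl (fun best c => min c best) a := by
  apply PySem.List.foldl_congr_mem
  intro acc x _
  omega

-- ===== VERDICT (by name: the statement is the Claim_ definition above) =====
theorem ga_spec : Claim_equal_ga := by
  intro b a _
  unfold Spec_ga ga ga_alt
  simp only [PySem.List.len_eq]
  set bl := b.toList
  set al := a.toList
  set k : Int := (al.length : Int) - (bl.length : Int) + 1 with hk
  by_cases hkle : k ≤ 0
  · rw [if_pos hkle,
        show PySem.List.pyRange 0 k 1 = [] from PySem.List.pyRange_one_eq_nil hkle]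
    rfl
  · rw [if_neg hkle]
    have hrep : PySem.List.pyRepeat [(0 : Int)] k
        = (PySem.List.pyRange 0 k 1).map (fun _ => 0) := by
      rw [PySem.List.pyRepeat_singleton, List.map_const', PySem.List.length_pyRange_one]
      congr 1; omega
    have hgs : (fun (cnt : List Int) (p : Int × Char) =>
        List.map (fun q => q.2 + if PySem.List.pyGetD al (q.1 + p.1) ' ' ≠ p.2 then (1 : Int) else 0)
          (PySem.List.enumerate cnt)) = gaStep al := rfl
    rw [hrep, hgs, gaFold_map, foldl_lt_eq_foldl_min, List.foldl_map]
    apply PySem.List.foldl_congr_mem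
    intro acc i _
    rw [inner_eq bl al i]
    simp
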